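-- pv_equiv track=rewrite | github.com/Algorithm-Study-AS/Algorithm-study | 김민서/구현/오리-12933.py | solution
-- ===== SOURCE A (Python) =====
-- def solution(sound):
--     answer = 0
--     ducks = []
--     quack = {'q': 0, 'u': 1, 'a': 2, 'c': 3, 'k': 4}
--
--     for s in sound:
--         for duck in ducks:
--             if len(duck) % 5 == quack[s]:
--                 duck.append(s)
--                 break
--
--         else:
--             if s == 'q':
--                 ducks.append(['q'])
--             else:
--                 return -1
--
--     for duck in ducks:
--         if len(duck) % 5 != 0:
--             return -1
--         answer += 1
--
--     return answer
-- ===== SOURCE B (Python) =====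
-- def solution(sound):
--     # One pass with 5 counters: counts[i] = number of ducks whose next expected
--     # letter is "quack"[i]; total = number of ducks created.
--     counts = [0, 0, 0, 0, 0]
--     total = 0
--     for s in sound:
--         i = "quack".find(s)
--         if i < 0:
--             return -1
--         if counts[i] > 0:
--             counts[i] -= 1
--             counts[(i + 1) % 5] += 1
--         elif i == 0:
--             total += 1
--             counts[1] += 1
--         else:
--             return -1
--     if counts[1] or counts[2] or counts[3] or counts[4]:
--         return -1
--     return total
-- ===== Notes on version B (the rewrite author's own statement) =====
-- stated objective: faster
-- what changed: Instead of keeping every duck's letter list and scanning the duck list for a matching duck on each sound character, B keeps just five counters (ducks indexed by next-expected letter) plus a total, updating them in O(1) per character.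
-- outside the precondition, e.g. on solution('qkx'): A returns -1, B returns -1
import Mathlib
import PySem

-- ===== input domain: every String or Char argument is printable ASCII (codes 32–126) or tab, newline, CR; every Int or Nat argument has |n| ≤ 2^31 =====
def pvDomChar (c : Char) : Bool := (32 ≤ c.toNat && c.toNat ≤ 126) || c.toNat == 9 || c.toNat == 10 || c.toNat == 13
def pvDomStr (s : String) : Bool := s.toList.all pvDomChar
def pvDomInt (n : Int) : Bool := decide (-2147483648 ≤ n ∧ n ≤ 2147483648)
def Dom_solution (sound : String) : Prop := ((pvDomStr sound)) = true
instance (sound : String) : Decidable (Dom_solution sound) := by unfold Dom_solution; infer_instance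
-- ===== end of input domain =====

-- B replaces A's per-duck letter lists and their inner per-character scan by five
-- counters of ducks keyed by next-expected letter, updated in a single pass.


-- ===== PORT A =====
-- quack = {'q': 0, 'u': 1, 'a': 2, 'c': 3, 'k': 4}
def quackDict : PySem.Dict Char Int :=
  PySem.Dict.ofList [('q', 0), ('u', 1), ('a', 2), ('c', 3), ('k', 4)]

-- inner 'for duck in ducks: … break / else: …' of A
def feedDuck : List (List Char) → Char → Int → Option (List (List Char))
  | [], s, _ => if s = 'q' then some [['q']] else none
  | d :: rest, s, i =>
    if PySem.Int.mod (d.length : Int) 5 = i then some ((d ++ [s]) :: rest)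
    else (feedDuck rest s i).map (d :: ·)

-- one iteration of A's outer loop; none = A has returned -1
-- (a character absent from the dict is a KeyError in A: excluded by Pre_solution, mapped to none here)
def stepA (st : Option (List (List Char))) (s : Char) : Option (List (List Char)) :=
  match st with
  | none => none
  | some ducks =>
    match PySem.Dict.get? quackDict s with
    | some i => feedDuck ducks s i
    | none => none

-- A's final loop: 'for duck in ducks: if len(duck) % 5 != 0: return -1; answer += 1'
def tallyA : List (List Char) → Int → Int
  | [], answer => answer
  | d :: rest, answer =>
    if PySem.Int.mod (d.length : Int) 5 ≠ 0 then -1 else tallyA rest (answer + 1)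

def solution (sound : String) : Int :=
  match sound.toList.foldl stepA (some []) with
  | none => -1
  | some ducks => tallyA ducks 0

-- ===== PORT B =====
-- one iteration of B's loop; none = B has returned -1
def stepB (st : Option (List Int × Int)) (s : Char) : Option (List Int × Int) :=
  match st with
  | none => none
  | some (counts, total) =>
    let i := PySem.Str.find "quack" (String.singleton s)
    if i < 0 then none
    else if 0 < PySem.List.pyGetD counts i 0 then
      let c1 := PySem.List.pySetD counts i (PySem.List.pyGetD counts i 0 - 1)
      let j := PySem.Int.mod (i + 1) 5
      some (PySem.List.pySetD c1 j (PySem.List.pyGetD c1 j 0 + 1), total)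
    else if i = 0 then
      some (PySem.List.pySetD counts 1 (PySem.List.pyGetD counts 1 0 + 1), total + 1)
    else none

def solution_alt (sound : String) : Int :=
  match sound.toList.foldl stepB (some ([0, 0, 0, 0, 0], 0)) with
  | none => -1
  | some (counts, total) =>
    if PySem.List.pyGetD counts 1 0 ≠ 0 ∨ PySem.List.pyGetD counts 2 0 ≠ 0 ∨
       PySem.List.pyGetD counts 3 0 ≠ 0 ∨ PySem.List.pyGetD counts 4 0 ≠ 0 then -1
    else total

-- ===== PRECONDITION & SPEC =====
-- Pre_ excludes strings that start with 'q' yet contain a character outside 'quack':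
-- on those A raises KeyError when the scan reaches that character (or, on a few of them,
-- has already returned -1 before reaching it). Strings not starting with 'q' are admitted:
-- A returns -1 immediately without ever evaluating the dict lookup.
def Pre_solution (sound : String) : Prop :=
  (sound.toList.all (fun c => c ∈ ['q', 'u', 'a', 'c', 'k'])) = true ∨
  sound.toList.head? ≠ some 'q' 
instance (sound : String) : Decidable (Pre_solution sound) := by
  unfold Pre_solution; infer_instance

def pvWitness_solution : String := "quack"

def Spec_solution (sound : String) (out : Int) : Prop := out = solution_alt sound
instance (sound : String) (out : Int) : Decidable (Spec_solution sound out) := by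
  unfold Spec_solution; infer_instance

-- ===== CLAIM (what is proved, stated in full; the proofs are below) =====
def Claim_equal_solution : Prop :=
  ∀ (sound : String), Dom_solution sound → Pre_solution sound →
    Spec_solution sound (solution sound)

-- ===== LEMMAS AND PROOFS =====

-- number of ducks whose length has residue i mod 5 (as the Python ints compare it)
def cnt (ducks : List (List Char)) (i : Int) : Int :=
  ((ducks.filter (fun d => PySem.Int.mod (d.length : Int) 5 = i)).length : Int)

lemma mod5_natCast (n : Nat) : PySem.Int.mod (n : Int) 5 = ((n % 5 : Nat) : Int) := by
  exact_mod_cast PySem.Int.mod_natCast n 5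

lemma cnt_nil (i : Int) : cnt [] i = 0 := rfl

lemma cnt_cons (d : List Char) (rest : List (List Char)) (i : Int) :
    cnt (d :: rest) i =
      (if PySem.Int.mod (d.length : Int) 5 = i then 1 else 0) + cnt rest i := by
  simp only [cnt, List.filter]
  split <;> rename_i h
  · simp at h; simp [h]; ring
  · simp at h; simp [h]

lemma cnt_nonneg (ducks : List (List Char)) (i : Int) : 0 ≤ cnt ducks i := by
  simp [cnt]

lemma cnt_append (xs ys : List (List Char)) (i : Int) :
    cnt (xs ++ ys) i = cnt xs i + cnt ys i := by
  simp [cnt, List.filter_append]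

lemma feed_none (ducks : List (List Char)) (s : Char) (i : Int)
    (h : cnt ducks i = 0) (hs : s ≠ 'q') : feedDuck ducks s i = none := by
  induction ducks with
  | nil => simp only [feedDuck, if_neg hs]
  | cons d rest ih =>
    rw [cnt_cons] at h
    have h2 := cnt_nonneg rest i
    by_cases hd : PySem.Int.mod (d.length : Int) 5 = i
    · rw [if_pos hd] at h; exfalso; omega
    · rw [if_neg hd] at h
      simp only [feedDuck, if_neg hd, ih (by omega), Option.map_none]

lemma feed_new (ducks : List (List Char)) (i : Int)
    (h : cnt ducks i = 0) : feedDuck ducks 'q' i = some (ducks ++ [['q']]) := by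
  induction ducks with
  | nil => simp [feedDuck]
  | cons d rest ih =>
    rw [cnt_cons] at h
    have h2 := cnt_nonneg rest i
    by_cases hd : PySem.Int.mod (d.length : Int) 5 = i
    · rw [if_pos hd] at h; exfalso; omega
    · rw [if_neg hd] at h
      simp only [feedDuck, if_neg hd, ih (by omega), Option.map_some, List.cons_append]

lemma feed_hit (ducks : List (List Char)) (s : Char) (i : Int)
    (h : cnt ducks i ≠ 0) :
    ∃ ducks', feedDuck ducks s i = some ducks' ∧
      (ducks'.length : Int) = (ducks.length : Int) ∧
      ∀ r, cnt ducks' r = cnt ducks r - (if r = i then 1 else 0) +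
        (if r = PySem.Int.mod (i + 1) 5 then 1 else 0) := by
  induction ducks with
  | nil => simp [cnt_nil] at h
  | cons d rest ih =>
    by_cases hd : PySem.Int.mod (d.length : Int) 5 = i
    · refine ⟨(d ++ [s]) :: rest, by simp only [feedDuck, if_pos hd], by simp, ?_⟩
      intro r
      rw [cnt_cons, cnt_cons]
      have hlen : ((d ++ [s]).length) = d.length + 1 := by simp
      rw [hlen]
      rw [mod5_natCast] at hd ⊢
      have hi1 : PySem.Int.mod (i + 1) 5 = (((d.length + 1) % 5 : Nat) : Int) := by
        rw [← hd]
        have : ((d.length % 5 : Nat) : Int) + 1 = (((d.length % 5 + 1) : Nat) : Int) := by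
          push_cast; ring
        rw [this, mod5_natCast]
        congr 1
        omega
      rw [hi1, ← hd]
      by_cases h1 : (((d.length + 1) % 5 : Nat) : Int) = r <;>
        by_cases h2 : ((d.length % 5 : Nat) : Int) = r <;>
          simp [h1, h2] <;> omega
    · rw [cnt_cons, if_neg hd] at h
      obtain ⟨ducks', he, hl, hc⟩ := ih (by omega)
      refine ⟨d :: ducks', by simp only [feedDuck, if_neg hd, he, Option.map_some], by simp; omega, ?_⟩
      intro r
      rw [cnt_cons, cnt_cons, hc r]
      by_cases h2 : PySem.Int.mod (d.length : Int) 5 = r <;> simp [h2] <;> ring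

-- invariant relating A's duck lists to B's counters
def DuckRel : Option (List (List Char)) → Option (List Int × Int) → Prop
  | none, none => True
  | some ducks, some (counts, total) =>
      counts = [cnt ducks 0, cnt ducks 1, cnt ducks 2, cnt ducks 3, cnt ducks 4] ∧
      total = (ducks.length : Int)
  | _, _ => False

lemma stepB_q (c0 c1 c2 c3 c4 t : Int) :
    stepB (some ([c0, c1, c2, c3, c4], t)) 'q' =
      if 0 < c0 then some ([c0 - 1, c1 + 1, c2, c3, c4], t)
      else some ([c0, c1 + 1, c2, c3, c4], t + 1) := by
  simp only [stepB]
  rw [show PySem.Str.find "quack" (String.singleton 'q') = 0 from by decide]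
  norm_num [PySem.List.pyGetD_ofNat', PySem.List.pySetD_of_nonneg, List.set,
    show ((2:Int).toNat = 2) from rfl, show ((4:Int).toNat = 4) from rfl,
    show PySem.Int.mod 1 5 = 1 from by decide]

lemma stepB_u (c0 c1 c2 c3 c4 t : Int) :
    stepB (some ([c0, c1, c2, c3, c4], t)) 'u' =
      if 0 < c1 then some ([c0, c1 - 1, c2 + 1, c3, c4], t) else none := by
  simp only [stepB]
  rw [show PySem.Str.find "quack" (String.singleton 'u') = 1 from by decide]
  norm_num [PySem.List.pyGetD_ofNat', PySem.List.pySetD_of_nonneg, List.set,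
    show ((2:Int).toNat = 2) from rfl, show ((4:Int).toNat = 4) from rfl,
    show PySem.Int.mod 2 5 = 2 from by decide]

lemma stepB_a (c0 c1 c2 c3 c4 t : Int) :
    stepB (some ([c0, c1, c2, c3, c4], t)) 'a' =
      if 0 < c2 then some ([c0, c1, c2 - 1, c3 + 1, c4], t) else none := by
  simp only [stepB]
  rw [show PySem.Str.find "quack" (String.singleton 'a') = 2 from by decide]
  norm_num [PySem.List.pyGetD_ofNat', PySem.List.pySetD_of_nonneg, List.set,
    show ((2:Int).toNat = 2) from rfl, show ((3:Int).toNat = 3) from rfl,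
    show ((4:Int).toNat = 4) from rfl,
    show PySem.Int.mod 3 5 = 3 from by decide]

lemma stepB_c (c0 c1 c2 c3 c4 t : Int) :
    stepB (some ([c0, c1, c2, c3, c4], t)) 'c' =
      if 0 < c3 then some ([c0, c1, c2, c3 - 1, c4 + 1], t) else none := by
  simp only [stepB]
  rw [show PySem.Str.find "quack" (String.singleton 'c') = 3 from by decide]
  norm_num [PySem.List.pyGetD_ofNat', PySem.List.pySetD_of_nonneg, List.set,
    show ((3:Int).toNat = 3) from rfl, show ((4:Int).toNat = 4) from rfl,
    show PySem.Int.mod 4 5 = 4 from by decide]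

lemma stepB_k (c0 c1 c2 c3 c4 t : Int) :
    stepB (some ([c0, c1, c2, c3, c4], t)) 'k' =
      if 0 < c4 then some ([c0 + 1, c1, c2, c3, c4 - 1], t) else none := by
  simp only [stepB]
  rw [show PySem.Str.find "quack" (String.singleton 'k') = 4 from by decide]
  norm_num [PySem.List.pyGetD_ofNat', PySem.List.pySetD_of_nonneg, List.set,
    show ((2:Int).toNat = 2) from rfl, show ((4:Int).toNat = 4) from rfl,
    show PySem.Int.mod 5 5 = 0 from by decide]

lemma step_rel (stA' : Option (List (List Char))) (stB' : Option (List Int × Int))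
    (s : Char) (hs : s ∈ ['q', 'u', 'a', 'c', 'k']) (h : DuckRel stA' stB') :
    DuckRel (stepA stA' s) (stepB stB' s) := by
  match stA', stB' with
  | none, none => simp [stepA, stepB, DuckRel]
  | none, some _ => exact absurd h (by simp [DuckRel])
  | some _, none => exact absurd h (by simp [DuckRel])
  | some ducks, some (counts, total) =>
    obtain ⟨hc, ht⟩ := h
    subst hc ht
    fin_cases hs
    · -- s = 'q'
      by_cases h0 : cnt ducks 0 = 0
      · rw [show stepA (some ducks) 'q' = feedDuck ducks 'q' 0 from rfl,
            feed_new ducks 0 h0, stepB_q, if_neg (by omega)]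
        have hap : ∀ r, cnt (ducks ++ [['q']]) r = cnt ducks r + (if (1 : Int) = r then 1 else 0) := by
          intro r
          rw [cnt_append, cnt_cons, cnt_nil]
          norm_num [show PySem.Int.mod ((1:Nat) : Int) 5 = 1 from by decide]
        refine ⟨?_, by simp⟩
        rw [hap 0, hap 1, hap 2, hap 3, hap 4]
        norm_num
      · obtain ⟨ducks', he, hl, hcn⟩ := feed_hit ducks 'q' 0 h0
        rw [show stepA (some ducks) 'q' = feedDuck ducks 'q' 0 from rfl, he, stepB_q,
            if_pos (by have := cnt_nonneg ducks 0; omega)]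
        have e0 := hcn 0; have e1 := hcn 1; have e2 := hcn 2
        have e3 := hcn 3; have e4 := hcn 4
        rw [show PySem.Int.mod (0 + 1) 5 = 1 from by decide] at e0 e1 e2 e3 e4
        norm_num at e0 e1 e2 e3 e4
        exact ⟨by rw [e0, e1, e2, e3, e4], hl.symm⟩
    · -- s = 'u'
      by_cases h0 : cnt ducks 1 = 0
      · rw [show stepA (some ducks) 'u' = feedDuck ducks 'u' 1 from rfl,
            feed_none ducks 'u' 1 h0 (by decide), stepB_u, if_neg (by omega)]
        trivial
      · obtain ⟨ducks', he, hl, hcn⟩ := feed_hit ducks 'u' 1 h0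
        rw [show stepA (some ducks) 'u' = feedDuck ducks 'u' 1 from rfl, he, stepB_u,
            if_pos (by have := cnt_nonneg ducks 1; omega)]
        have e0 := hcn 0; have e1 := hcn 1; have e2 := hcn 2
        have e3 := hcn 3; have e4 := hcn 4
        rw [show PySem.Int.mod (1 + 1) 5 = 2 from by decide] at e0 e1 e2 e3 e4
        norm_num at e0 e1 e2 e3 e4
        exact ⟨by rw [e0, e1, e2, e3, e4], hl.symm⟩
    · -- s = 'a'
      by_cases h0 : cnt ducks 2 = 0
      · rw [show stepA (some ducks) 'a' = feedDuck ducks 'a' 2 from rfl,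
            feed_none ducks 'a' 2 h0 (by decide), stepB_a, if_neg (by omega)]
        trivial
      · obtain ⟨ducks', he, hl, hcn⟩ := feed_hit ducks 'a' 2 h0
        rw [show stepA (some ducks) 'a' = feedDuck ducks 'a' 2 from rfl, he, stepB_a,
            if_pos (by have := cnt_nonneg ducks 2; omega)]
        have e0 := hcn 0; have e1 := hcn 1; have e2 := hcn 2
        have e3 := hcn 3; have e4 := hcn 4
        rw [show PySem.Int.mod (2 + 1) 5 = 3 from by decide] at e0 e1 e2 e3 e4
        norm_num at e0 e1 e2 e3 e4
        exact ⟨by rw [e0, e1, e2, e3, e4], hl.symm⟩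
    · -- s = 'c'
      by_cases h0 : cnt ducks 3 = 0
      · rw [show stepA (some ducks) 'c' = feedDuck ducks 'c' 3 from rfl,
            feed_none ducks 'c' 3 h0 (by decide), stepB_c, if_neg (by omega)]
        trivial
      · obtain ⟨ducks', he, hl, hcn⟩ := feed_hit ducks 'c' 3 h0
        rw [show stepA (some ducks) 'c' = feedDuck ducks 'c' 3 from rfl, he, stepB_c,
            if_pos (by have := cnt_nonneg ducks 3; omega)]
        have e0 := hcn 0; have e1 := hcn 1; have e2 := hcn 2
        have e3 := hcn 3; have e4 := hcn 4
        rw [show PySem.Int.mod (3 + 1) 5 = 4 from by decide] at e0 e1 e2 e3 e4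
        norm_num at e0 e1 e2 e3 e4
        exact ⟨by rw [e0, e1, e2, e3, e4], hl.symm⟩
    · -- s = 'k'
      by_cases h0 : cnt ducks 4 = 0
      · rw [show stepA (some ducks) 'k' = feedDuck ducks 'k' 4 from rfl,
            feed_none ducks 'k' 4 h0 (by decide), stepB_k, if_neg (by omega)]
        trivial
      · obtain ⟨ducks', he, hl, hcn⟩ := feed_hit ducks 'k' 4 h0
        rw [show stepA (some ducks) 'k' = feedDuck ducks 'k' 4 from rfl, he, stepB_k,
            if_pos (by have := cnt_nonneg ducks 4; omega)]
        have e0 := hcn 0; have e1 := hcn 1; have e2 := hcn 2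
        have e3 := hcn 3; have e4 := hcn 4
        rw [show PySem.Int.mod (4 + 1) 5 = 0 from by decide] at e0 e1 e2 e3 e4
        norm_num at e0 e1 e2 e3 e4
        exact ⟨by rw [e0, e1, e2, e3, e4], hl.symm⟩

lemma fold_rel (l : List Char) (hl : ∀ c ∈ l, c ∈ ['q', 'u', 'a', 'c', 'k'])
    (stA' : Option (List (List Char))) (stB' : Option (List Int × Int))
    (h : DuckRel stA' stB') :
    DuckRel (l.foldl stepA stA') (l.foldl stepB stB') := by
  induction l generalizing stA' stB' with
  | nil => exact h
  | cons c cs ih =>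
    exact ih (fun x hx => hl x (by simp [hx]))
      _ _ (step_rel _ _ c (hl c (by simp)) h)

lemma tally_eq (ducks : List (List Char)) (a : Int) :
    tallyA ducks a =
      if ∀ d ∈ ducks, PySem.Int.mod (d.length : Int) 5 = 0 then a + ducks.length else -1 := by
  induction ducks generalizing a with
  | nil => simp [tallyA]
  | cons d rest ih =>
    by_cases hd : PySem.Int.mod (d.length : Int) 5 = 0
    · rw [tallyA, if_neg (not_not_intro hd), ih]
      by_cases hr : ∀ d ∈ rest, PySem.Int.mod (d.length : Int) 5 = 0
      · rw [if_pos hr, if_pos (by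
          intro x hx
          rcases List.mem_cons.mp hx with h | h
          · exact h ▸ hd
          · exact hr x h)]
        simp only [List.length_cons]; push_cast; ring
      · rw [if_neg hr, if_neg (fun hall => hr fun x hx => hall x (List.mem_cons_of_mem _ hx))]
    · rw [tallyA, if_pos hd, if_neg (fun hall => hd (hall d List.mem_cons_self))]

lemma all_iff (ducks : List (List Char)) :
    (∀ d ∈ ducks, PySem.Int.mod (d.length : Int) 5 = 0) ↔
      (cnt ducks 1 = 0 ∧ cnt ducks 2 = 0 ∧ cnt ducks 3 = 0 ∧ cnt ducks 4 = 0) := by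
  induction ducks with
  | nil => simp [cnt_nil]
  | cons d rest ih =>
    have h1 := cnt_nonneg rest 1
    have h2 := cnt_nonneg rest 2
    have h3 := cnt_nonneg rest 3
    have h4 := cnt_nonneg rest 4
    rw [cnt_cons, cnt_cons, cnt_cons, cnt_cons]
    simp only [List.mem_cons, forall_eq_or_imp]
    rw [ih, mod5_natCast]
    have hm : d.length % 5 < 5 := Nat.mod_lt _ (by omega)
    set m := d.length % 5 with hmd
    clear_value m
    interval_cases m <;> norm_num <;> omega

lemma pyGetD_five (a b c d e z : Int) :
    PySem.List.pyGetD [a, b, c, d, e] 1 z = b ∧ PySem.List.pyGetD [a, b, c, d, e] 2 z = c ∧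
    PySem.List.pyGetD [a, b, c, d, e] 3 z = d ∧ PySem.List.pyGetD [a, b, c, d, e] 4 z = e := by
  refine ⟨?_, ?_, ?_, ?_⟩ <;> simp [PySem.List.pyGetD_ofNat']

lemma foldlA_none (l : List Char) : l.foldl stepA none = none := by
  induction l with
  | nil => rfl
  | cons c rest ih => simpa [stepA] using ih

lemma foldlB_none (l : List Char) : l.foldl stepB none = none := by
  induction l with
  | nil => rfl
  | cons c rest ih => simpa [stepB] using ih

lemma stepA_first (c : Char) (hc : c ≠ 'q') : stepA (some []) c = none := by
  by_cases hm : c ∈ ['q', 'u', 'a', 'c', 'k']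
  · fin_cases hm
    · exact absurd rfl hc
    all_goals decide
  · have hd : PySem.Dict.get? quackDict c = none := by
      rw [PySem.Dict.get?_eq_none_iff_not_mem_keys]
      rw [show quackDict.keys = ['q', 'u', 'a', 'c', 'k'] from by decide]
      exact hm
    simp only [stepA, hd]

lemma stepB_first (c : Char) (hc : c ≠ 'q') : stepB (some ([0, 0, 0, 0, 0], 0)) c = none := by
  by_cases hm : c ∈ ['q', 'u', 'a', 'c', 'k']
  · fin_cases hm
    · exact absurd rfl hc
    all_goals decide
  · have hfind : PySem.Str.find "quack" (String.singleton c) = -1 := by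
      have hnin : ¬ [c] <:+: "quack".toList := by
        intro h
        exact hm (by simpa using h.subset (by simp))
      rw [PySem.Str.find_eq_neg_one_iff]
      simpa using hnin
    simp only [stepB]
    rw [hfind]
    norm_num

-- ===== VERDICT (by name: the statement is the Claim_ definition above) =====
theorem solution_spec : Claim_equal_solution := by
  intro sound _ hpre
  unfold Pre_solution at hpre
  rcases hpre with hall | hhead
  case inr =>
    unfold Spec_solution solution solution_alt
    match hl : sound.toList with
    | [] => rfl
    | c :: rest =>
      rw [hl] at hhead
      simp only [List.head?_cons, ne_eq, Option.some.injEq] at hhead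
      simp only [List.foldl_cons, stepA_first c hhead, stepB_first c hhead,
        foldlA_none, foldlB_none]
  case inl =>
  unfold Spec_solution solution solution_alt
  have hpre' : ∀ c ∈ sound.toList, c ∈ ['q', 'u', 'a', 'c', 'k'] := by
    intro c hc
    exact of_decide_eq_true (List.all_eq_true.mp hall c hc)
  have hrel := fold_rel sound.toList hpre'  (some []) (some ([0, 0, 0, 0, 0], 0))
    (by simp [DuckRel, cnt_nil])
  match hA : sound.toList.foldl stepA (some []), hB : sound.toList.foldl stepB (some ([0,0,0,0,0], 0)) with
  | none, none => rfl
  | none, some _ => rw [hA, hB] at hrel; exact absurd hrel (by simp [DuckRel])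
  | some _, none => rw [hA, hB] at hrel; exact absurd hrel (by simp [DuckRel])
  | some ducks, some (counts, total) =>
    rw [hA, hB] at hrel
    obtain ⟨hc, ht⟩ := hrel
    subst hc ht
    obtain ⟨g1, g2, g3, g4⟩ := pyGetD_five (cnt ducks 0) (cnt ducks 1) (cnt ducks 2)
      (cnt ducks 3) (cnt ducks 4) 0
    show tallyA ducks 0 =
      if PySem.List.pyGetD [cnt ducks 0, cnt ducks 1, cnt ducks 2, cnt ducks 3, cnt ducks 4] 1 0 ≠ 0 ∨
         PySem.List.pyGetD [cnt ducks 0, cnt ducks 1, cnt ducks 2, cnt ducks 3, cnt ducks 4] 2 0 ≠ 0 ∨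
         PySem.List.pyGetD [cnt ducks 0, cnt ducks 1, cnt ducks 2, cnt ducks 3, cnt ducks 4] 3 0 ≠ 0 ∨
         PySem.List.pyGetD [cnt ducks 0, cnt ducks 1, cnt ducks 2, cnt ducks 3, cnt ducks 4] 4 0 ≠ 0 then -1
      else (ducks.length : Int)
    rw [tally_eq]
    by_cases hall : ∀ d ∈ ducks, PySem.Int.mod (d.length : Int) 5 = 0
    · obtain ⟨e1, e2, e3, e4⟩ := (all_iff ducks).mp hall
      rw [if_pos hall, g1, g2, g3, g4, e1, e2, e3, e4]
      norm_num
    · rw [if_neg hall, g1, g2, g3, g4]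
      have hne : ¬(cnt ducks 1 = 0 ∧ cnt ducks 2 = 0 ∧ cnt ducks 3 = 0 ∧ cnt ducks 4 = 0) :=
        fun hcc => hall ((all_iff ducks).mpr hcc)
      rw [if_pos (by tauto)]
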